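-- pv_equiv track=rewrite | github.com/kruchinkinSergey/intensiv_vk_po_algoritmam | дз11/1.py | find_min_max_product
-- ===== SOURCE A (Python) =====
-- def find_min_max_product(arr):
--     if not arr:
--         return None
--
--     index_min = 0
--     index_max = 0
--
--     while 2 * index_min + 1 < len(arr):
--         index_min = 2 * index_min + 1
--
--     while 2 * index_max + 2 < len(arr):
--         index_max = 2 * index_max + 2
--
--     return arr[index_min] * arr[index_max]
-- ===== SOURCE B (Python) =====
-- def find_min_max_product(arr):
--     if not arr:
--         return None
--     n = len(arr)
--     index_min = (1 << (n.bit_length() - 1)) - 1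
--     index_max = (1 << ((n + 1).bit_length() - 1)) - 2
--     return arr[index_min] * arr[index_max]
-- ===== Notes on version B (the rewrite author's own statement) =====
-- stated objective: simpler
-- what changed: Both while loops chasing the leftmost/rightmost child chains are replaced by closed-form index formulas from bit_length of the list length.
import Mathlib
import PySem

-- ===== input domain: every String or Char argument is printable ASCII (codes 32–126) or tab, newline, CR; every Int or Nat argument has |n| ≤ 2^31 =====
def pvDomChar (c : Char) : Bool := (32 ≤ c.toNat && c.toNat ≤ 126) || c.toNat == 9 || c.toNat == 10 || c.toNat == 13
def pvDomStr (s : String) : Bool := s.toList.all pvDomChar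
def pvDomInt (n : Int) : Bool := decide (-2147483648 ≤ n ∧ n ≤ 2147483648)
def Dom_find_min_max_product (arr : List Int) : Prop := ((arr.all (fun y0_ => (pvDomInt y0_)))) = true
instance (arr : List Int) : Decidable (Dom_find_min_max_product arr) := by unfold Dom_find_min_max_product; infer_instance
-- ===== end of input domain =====

-- B replaces A's two index-chasing while loops by closed-form bit_length formulas (objective: simpler).

-- ===== PORT A =====
-- while 2*i+1 < n: i = 2*i+1
def pvLoopMin (n i : Nat) : Nat :=
  if 2 * i + 1 < n then pvLoopMin n (2 * i + 1) else i
termination_by n - i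
decreasing_by omega

-- while 2*i+2 < n: i = 2*i+2
def pvLoopMax (n i : Nat) : Nat :=
  if 2 * i + 2 < n then pvLoopMax n (2 * i + 2) else i
termination_by n - i
decreasing_by omega

def find_min_max_product (arr : List Int) : Option Int :=
  if arr = [] then none
  else
    let index_min := pvLoopMin arr.length 0
    let index_max := pvLoopMax arr.length 0
    -- arr[index_min] * arr[index_max]; pyGet? none = IndexError (never reached)
    match PySem.List.pyGet? arr (index_min : Int), PySem.List.pyGet? arr (index_max : Int) with
    | some a, some b => some (a * b)
    | _, _ => none

-- ===== PORT B =====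
-- n.bit_length() = Nat.size n
def find_min_max_product_alt (arr : List Int) : Option Int :=
  if arr = [] then none
  else
    let n := arr.length
    let index_min : Nat := 2 ^ (Nat.size n - 1) - 1
    let index_max : Nat := 2 ^ (Nat.size (n + 1) - 1) - 2
    (PySem.List.pyGet? arr (index_min : Int)).bind fun a =>
      (PySem.List.pyGet? arr (index_max : Int)).map fun b => a * b

-- ===== PRECONDITION & SPEC =====
def Spec_find_min_max_product (arr : List Int) (out : Option Int) : Prop := out = find_min_max_product_alt arr
instance (arr : List Int) (out : Option Int) : Decidable (Spec_find_min_max_product arr out) := by unfold Spec_find_min_max_product; infer_instance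

-- ===== CLAIM (what is proved, stated in full; the proofs are below) =====
def Claim_equal_find_min_max_product : Prop := ∀ (arr : List Int), Dom_find_min_max_product arr → Spec_find_min_max_product arr (find_min_max_product arr)

-- ===== LEMMAS AND PROOFS =====

lemma pv_size_eq {n k : Nat} (h1 : 2 ^ k ≤ n) (h2 : n < 2 ^ (k + 1)) : Nat.size n = k + 1 := by
  have a : k < Nat.size n := Nat.lt_size.mpr h1
  have b : Nat.size n ≤ k + 1 := Nat.size_le.mpr h2
  omega

lemma pvLoopMin_eq (n : Nat) :
    ∀ d k, Nat.size n - k ≤ d → 2 ^ k ≤ n → pvLoopMin n (2 ^ k - 1) = 2 ^ (Nat.size n - 1) - 1 := by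
  intro d
  induction d with
  | zero =>
    intro k hd hk
    exact absurd (Nat.lt_size.mpr hk) (by omega)
  | succ d ih =>
    intro k hd hk
    have hp : 1 ≤ 2 ^ k := Nat.one_le_two_pow
    rw [pvLoopMin]
    by_cases hc : 2 * (2 ^ k - 1) + 1 < n
    · rw [if_pos hc]
      have h2 : 2 ^ (k + 1) ≤ n := by
        have : 2 ^ (k + 1) = 2 * 2 ^ k := by ring
        omega
      have : 2 * (2 ^ k - 1) + 1 = 2 ^ (k + 1) - 1 := by
        have : 2 ^ (k + 1) = 2 * 2 ^ k := by ring
        omega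
      rw [this]
      exact ih (k + 1) (by omega) h2
    · rw [if_neg hc]
      have h2 : n < 2 ^ (k + 1) := by
        have : 2 ^ (k + 1) = 2 * 2 ^ k := by ring
        omega
      rw [pv_size_eq hk h2]
      simp

lemma pvLoopMax_eq (n : Nat) :
    ∀ d k, 1 ≤ k → Nat.size (n + 1) - k ≤ d → 2 ^ k ≤ n + 1 →
      pvLoopMax n (2 ^ k - 2) = 2 ^ (Nat.size (n + 1) - 1) - 2 := by
  intro d
  induction d with
  | zero =>
    intro k hk1 hd hk
    exact absurd (Nat.lt_size.mpr hk) (by omega)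
  | succ d ih =>
    intro k hk1 hd hk
    have hp : 2 ≤ 2 ^ k := by
      calc 2 = 2 ^ 1 := by norm_num
        _ ≤ 2 ^ k := Nat.pow_le_pow_right (by norm_num) hk1
    rw [pvLoopMax]
    by_cases hc : 2 * (2 ^ k - 2) + 2 < n
    · rw [if_pos hc]
      have h2 : 2 ^ (k + 1) ≤ n + 1 := by
        have : 2 ^ (k + 1) = 2 * 2 ^ k := by ring
        omega
      have : 2 * (2 ^ k - 2) + 2 = 2 ^ (k + 1) - 2 := by
        have : 2 ^ (k + 1) = 2 * 2 ^ k := by ring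
        omega
      rw [this]
      exact ih (k + 1) (by omega) (by omega) h2
    · rw [if_neg hc]
      have h2 : n + 1 < 2 ^ (k + 1) := by
        have : 2 ^ (k + 1) = 2 * 2 ^ k := by ring
        omega
      rw [pv_size_eq hk h2]
      simp

-- ===== VERDICT (by name: the statement is the Claim_ definition above) =====
theorem find_min_max_product_spec : Claim_equal_find_min_max_product := by
  intro arr _
  unfold Spec_find_min_max_product find_min_max_product find_min_max_product_alt
  by_cases h : arr = []
  · simp [h]
  · rw [if_neg h, if_neg h]
    have hn : 1 ≤ arr.length := by
      cases arr with
      | nil => exact absurd rfl h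
      | cons a t => simp
    have hmin : pvLoopMin arr.length 0 = 2 ^ (Nat.size arr.length - 1) - 1 := by
      have := pvLoopMin_eq arr.length (Nat.size arr.length) 0 (by omega) (by simpa using hn)
      simpa using this
    have hmax : pvLoopMax arr.length 0 = 2 ^ (Nat.size (arr.length + 1) - 1) - 2 := by
      have := pvLoopMax_eq arr.length (Nat.size (arr.length + 1)) 1 (by omega) (by omega)
        (by norm_num; omega)
      simpa using this
    simp only [hmin, hmax]
    cases PySem.List.pyGet? arr ((2 ^ (Nat.size arr.length - 1) - 1 : Nat) : Int) <;>
      cases PySem.List.pyGet? arr ((2 ^ (Nat.size (arr.length + 1) - 1) - 2 : Nat) : Int) <;> rfl
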